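-- pv_equiv track=rewrite | github.com/Ran2013/Info_qq | get_qq_info.py | ptqrtoken
-- ===== SOURCE A (Python) =====
-- def ptqrtoken(qrsig):
--     n = len(qrsig)
--     i = 0
--     e = 0
--     while n > i:
--         e += (e << 5) + ord(qrsig[i])
--         i += 1
--     return 2147483647 & e
-- ===== SOURCE B (Python) =====
-- def ptqrtoken(qrsig):
--     e = 0
--     power = 1
--     for c in reversed(qrsig):
--         e += ord(c) * power
--         power *= 33
--     return 2147483647 & e
-- ===== Notes on version B (the rewrite author's own statement) =====
-- stated objective: alternative
-- what changed: Replaces Horner's forward accumulation e = 33*e + ord(c) with an explicit polynomial evaluation: a back-to-front pass keeping a running power of 33 and adding ord(c)*power each step.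
import Mathlib
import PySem

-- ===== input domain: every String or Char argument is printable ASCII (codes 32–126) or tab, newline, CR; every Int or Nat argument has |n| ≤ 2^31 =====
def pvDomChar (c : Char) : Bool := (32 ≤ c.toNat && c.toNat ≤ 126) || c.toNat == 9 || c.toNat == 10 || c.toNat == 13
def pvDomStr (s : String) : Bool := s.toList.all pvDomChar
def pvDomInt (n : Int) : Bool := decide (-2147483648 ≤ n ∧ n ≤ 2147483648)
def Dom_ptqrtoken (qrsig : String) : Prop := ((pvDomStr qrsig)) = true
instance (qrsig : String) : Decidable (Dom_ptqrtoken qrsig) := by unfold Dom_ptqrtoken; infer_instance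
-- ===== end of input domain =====

-- B replaces A's forward Horner accumulation by an explicit back-to-front polynomial
-- evaluation with a running power of 33; same O(n) cost (objective: alternative).

-- ===== PORT A =====
-- A's loop body: e += (e << 5) + ord(qrsig[i]); on Python ints e << 5 is exactly e * 32.
def ptqrtoken (qrsig : String) : Int :=
  let e := qrsig.toList.foldl (fun e c => e + (e * 32 + (c.toNat : Int))) 0
  Int.land 2147483647 e  -- Python's '&' on ints (both nonneg here)

-- ===== PORT B =====
-- e += ord(c) * power; power *= 33, over the reversed string.
def ptqrtoken_alt (qrsig : String) : Int :=
  let ep := qrsig.toList.reverse.foldl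
    (fun (ep : Int × Int) c => (ep.1 + (c.toNat : Int) * ep.2, ep.2 * 33)) (0, 1)
  Int.land 2147483647 ep.1  -- Python's '&' on ints (both nonneg here)

-- ===== PRECONDITION & SPEC =====
def Spec_ptqrtoken (qrsig : String) (out : Int) : Prop := out = ptqrtoken_alt qrsig
instance (qrsig : String) (out : Int) : Decidable (Spec_ptqrtoken qrsig out) := by unfold Spec_ptqrtoken; infer_instance

-- ===== CLAIM (what is proved, stated in full; the proofs are below) =====
def Claim_equal_ptqrtoken : Prop := ∀ (qrsig : String), Dom_ptqrtoken qrsig → Spec_ptqrtoken qrsig (ptqrtoken qrsig)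

-- ===== LEMMAS AND PROOFS =====

-- B's pair fold: the running power component is 33^len times the start power.
theorem pvB_snd (l : List Char) (e p : Int) :
    (l.foldl (fun (ep : Int × Int) c => (ep.1 + (c.toNat : Int) * ep.2, ep.2 * 33)) (e, p)).2
      = p * 33 ^ l.length := by
  induction l generalizing e p with
  | nil => simp
  | cons c l ih => simp [List.foldl_cons, ih]; ring

-- B's pair fold: the accumulator from a general start (e, p).
theorem pvB_fst (l : List Char) (e p : Int) :
    (l.foldl (fun (ep : Int × Int) c => (ep.1 + (c.toNat : Int) * ep.2, ep.2 * 33)) (e, p)).1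
      = e + p * (l.foldl (fun (ep : Int × Int) c => (ep.1 + (c.toNat : Int) * ep.2, ep.2 * 33)) (0, 1)).1 := by
  induction l generalizing e p with
  | nil => simp
  | cons c l ih =>
    simp only [List.foldl_cons]
    rw [ih (e + (c.toNat : Int) * p) (p * 33), ih ((0 : Int) + (c.toNat : Int) * 1) (1 * 33)]
    ring

-- A's Horner fold from a general start e.
theorem pvA_gen (l : List Char) (e : Int) :
    l.foldl (fun e c => e + (e * 32 + (c.toNat : Int))) e
      = e * 33 ^ l.length + l.foldl (fun e c => e + (e * 32 + (c.toNat : Int))) 0 := by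
  induction l generalizing e with
  | nil => simp
  | cons c l ih =>
    simp only [List.foldl_cons]
    rw [ih (e + (e * 32 + (c.toNat : Int))), ih ((0 : Int) + (0 * 32 + (c.toNat : Int)))]
    simp only [List.length_cons, pow_succ]
    ring

-- The two accumulators agree before masking.
theorem pvAcc_eq (l : List Char) :
    l.foldl (fun e c => e + (e * 32 + (c.toNat : Int))) 0
      = (l.reverse.foldl (fun (ep : Int × Int) c => (ep.1 + (c.toNat : Int) * ep.2, ep.2 * 33)) (0, 1)).1 := by
  induction l with
  | nil => simp
  | cons c l ih =>
    simp only [List.foldl_cons, List.reverse_cons, List.foldl_append]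
    rw [pvA_gen l ((0 : Int) + (0 * 32 + (c.toNat : Int)))]
    simp only [List.foldl_nil]
    rw [pvB_fst, pvB_snd, ih]
    simp [List.length_reverse]
    ring

-- ===== VERDICT (by name: the statement is the Claim_ definition above) =====
theorem ptqrtoken_spec : Claim_equal_ptqrtoken := by
  intro qrsig _
  simp only [Spec_ptqrtoken, ptqrtoken, ptqrtoken_alt]
  rw [pvAcc_eq]
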